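-- pv_equiv track=rewrite | github.com/Alexander-Ageev/Exercises | ASD_2/5. Balanced search trees/main.py | GenArray
-- ===== SOURCE A (Python) =====
-- def GetMiddleIndex(array: list):
--     size = len(array)
--     if size == 0:
--         mid_index = -1
--     else:
--         mid_index = size // 2
--     return mid_index
--
-- def GenArray(array: list, left: list, right: list):
--     left_child_index = GetMiddleIndex(left)
--     if left_child_index != -1:
--         array.append(left[left_child_index])
--         GenArray(array, left[0: left_child_index], left[left_child_index+1:])
--
--     right_child_index = GetMiddleIndex(right)
--     if right_child_index != -1:
--         array.append(right[right_child_index])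
--         GenArray(array, right[0: right_child_index], right[right_child_index+1:])
--     return array
-- ===== SOURCE B (Python) =====
-- def GenArray(array: list, left: list, right: list):
--     # Iterative version: explicit stack replaces the recursion; left is pushed
--     # last so it is processed first, reproducing the recursive preorder.
--     # Like A, mutates `array` in place and returns it.
--     stack = [right, left]
--     while stack:
--         chunk = stack.pop()
--         if chunk:
--             mid = len(chunk) // 2
--             array.append(chunk[mid])
--             stack.append(chunk[mid + 1:])
--             stack.append(chunk[:mid])
--     return array
-- ===== Notes on version B (the rewrite author's own statement) =====
-- stated objective: alternative
-- what changed: Replaced the double self-recursion over (left-half, right-half) pairs by a single iterative loop over an explicit stack of pending slices, appending the middle element of each popped slice.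
import Mathlib
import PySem

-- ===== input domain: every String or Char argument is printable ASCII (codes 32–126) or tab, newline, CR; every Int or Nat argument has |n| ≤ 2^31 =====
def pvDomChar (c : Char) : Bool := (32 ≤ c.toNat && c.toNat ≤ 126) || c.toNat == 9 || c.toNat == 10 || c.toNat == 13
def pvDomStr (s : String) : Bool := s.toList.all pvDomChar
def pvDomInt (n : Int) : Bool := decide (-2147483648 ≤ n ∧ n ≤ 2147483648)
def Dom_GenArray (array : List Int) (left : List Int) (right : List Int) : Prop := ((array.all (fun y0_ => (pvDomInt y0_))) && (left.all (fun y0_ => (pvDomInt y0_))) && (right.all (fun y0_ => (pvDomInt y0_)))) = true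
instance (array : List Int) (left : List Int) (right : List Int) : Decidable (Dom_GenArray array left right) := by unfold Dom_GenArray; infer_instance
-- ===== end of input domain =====

-- B replaces A's double recursion by one loop over an explicit stack of pending
-- slices (same output order; like A, the Python B mutates `array` in place and
-- returns it — the equivalence proved here is about the returned value).

-- ===== PORT A =====
def GetMiddleIndex (array : List Int) : Int :=
  let size : Int := array.length
  if size = 0 then (-1 : Int) else PySem.Int.floordiv size 2

-- termination lemma for the port (cited in decreasing_by)
theorem pvSliceLenLt (L : List Int) (h : GetMiddleIndex L ≠ -1) :
    (PySem.List.slice L (some 0) (some (GetMiddleIndex L))).length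
      + (PySem.List.slice L (some (GetMiddleIndex L + 1)) none).length < L.length := by
  have hne : L.length ≠ 0 := by
    intro h0
    apply h
    simp [GetMiddleIndex, h0]
  have hg : GetMiddleIndex L = ((L.length / 2 : Nat) : Int) := by
    simp [GetMiddleIndex, hne]
  rw [hg]
  have h1 : PySem.List.slice L (some 0) (some ((L.length / 2 : Nat) : Int)) = L.take (L.length / 2) := by
    rw [PySem.List.slice_zero_start, PySem.List.slice_to_natCast]
  have h2 : PySem.List.slice L (some (((L.length / 2 : Nat) : Int) + 1)) none = L.drop (L.length / 2 + 1) := by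
    have hc : (((L.length / 2 : Nat) : Int) + 1) = ((L.length / 2 + 1 : Nat) : Int) := by push_cast; ring
    rw [hc, PySem.List.slice_from_natCast]
  rw [h1, h2]
  simp only [List.length_take, List.length_drop]
  omega

def GenArray (array : List Int) (left : List Int) (right : List Int) : List Int :=
  let left_child_index := GetMiddleIndex left
  let a1 :=
    if h : left_child_index ≠ -1 then
      -- left[left_child_index] never raises here (0 ≤ index < len); pyGetD is exact
      GenArray (array ++ [PySem.List.pyGetD left left_child_index 0])
        (PySem.List.slice left (some 0) (some left_child_index))
        (PySem.List.slice left (some (left_child_index + 1)) none)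
    else array
  let right_child_index := GetMiddleIndex right
  if h : right_child_index ≠ -1 then
    GenArray (a1 ++ [PySem.List.pyGetD right right_child_index 0])
      (PySem.List.slice right (some 0) (some right_child_index))
      (PySem.List.slice right (some (right_child_index + 1)) none)
  else a1
termination_by left.length + right.length
decreasing_by
  · have := pvSliceLenLt left h; omega
  · have := pvSliceLenLt right h; omega

-- ===== PORT B =====
-- the while loop of Source B; stack is a list whose HEAD is the top of the Python stack
def pvLoopB (array : List Int) (stack : List (List Int)) : List Int :=
  match stack with
  | [] => array
  | chunk :: rest =>
    if chunk = [] then pvLoopB array rest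
    else
      let mid := chunk.length / 2
      -- chunk[mid] never raises (0 ≤ mid < len); getD is exact here
      pvLoopB (array ++ [chunk.getD mid 0]) (chunk.take mid :: chunk.drop (mid + 1) :: rest)
termination_by ((stack.map List.length).sum, stack.length)
decreasing_by
  · apply Prod.Lex.right' <;> simp
  · apply Prod.Lex.left
    have : chunk.length ≠ 0 := by simpa using ‹chunk ≠ []›
    simp only [List.map_cons, List.sum_cons, List.length_take, List.length_drop]
    omega

def GenArray_alt (array : List Int) (left : List Int) (right : List Int) : List Int :=
  -- stack = [right, left] in Python, popped from the end: head-of-list = top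
  pvLoopB array [left, right]

-- ===== PRECONDITION & SPEC =====
def Spec_GenArray (array : List Int) (left : List Int) (right : List Int) (out : List Int) : Prop := out = GenArray_alt array left right
instance (array : List Int) (left : List Int) (right : List Int) (out : List Int) : Decidable (Spec_GenArray array left right out) := by unfold Spec_GenArray; infer_instance

-- ===== CLAIM (what is proved, stated in full; the proofs are below) =====
def Claim_equal_GenArray : Prop := ∀ (array : List Int) (left : List Int) (right : List Int), Dom_GenArray array left right → Spec_GenArray array left right (GenArray array left right)

-- ===== LEMMAS AND PROOFS =====

-- the common preorder of the middle-element traversal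
def pvOrd (L : List Int) : List Int :=
  if _h : L = [] then []
  else
    let m := L.length / 2
    L.getD m 0 :: (pvOrd (L.take m) ++ pvOrd (L.drop (m + 1)))
termination_by L.length
decreasing_by
  all_goals
    have hl : L.length ≠ 0 := by simpa using _h
    simp only [List.length_take, List.length_drop]
    omega

theorem pvGmi_ne (L : List Int) : GetMiddleIndex L ≠ -1 ↔ L ≠ [] := by
  constructor
  · intro h h0; apply h; simp [GetMiddleIndex, h0]
  · intro h
    have hl : L.length ≠ 0 := by simpa using h
    simp [GetMiddleIndex, hl]
    omega

theorem pvGmi_val (L : List Int) (h : L ≠ []) :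
    GetMiddleIndex L = ((L.length / 2 : Nat) : Int) := by
  have hl : L.length ≠ 0 := by simpa using h
  simp [GetMiddleIndex, hl]

theorem pvOrd_nil : pvOrd [] = [] := by
  rw [pvOrd]; simp

theorem pvOrd_ne (L : List Int) (h : L ≠ []) :
    pvOrd L = L.getD (L.length / 2) 0
      :: (pvOrd (L.take (L.length / 2)) ++ pvOrd (L.drop (L.length / 2 + 1))) := by
  rw [pvOrd]; simp [h]

theorem pvA_eq (n : Nat) : ∀ (array l r : List Int), l.length + r.length ≤ n →
    GenArray array l r = array ++ pvOrd l ++ pvOrd r := by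
  induction n with
  | zero =>
    intro array l r hn
    have hl : l = [] := by cases l <;> simp_all
    have hr : r = [] := by cases r <;> simp_all
    subst hl; subst hr
    rw [GenArray]
    simp [GetMiddleIndex, pvOrd_nil]
  | succ n ih =>
    intro array l r hn
    rw [GenArray]
    have step : ∀ (acc L : List Int), L.length ≤ n + 1 → L ≠ [] →
        GenArray (acc ++ [PySem.List.pyGetD L (GetMiddleIndex L) 0])
          (PySem.List.slice L (some 0) (some (GetMiddleIndex L)))
          (PySem.List.slice L (some (GetMiddleIndex L + 1)) none)
          = acc ++ pvOrd L := by
      intro acc L hL hne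
      have hlen : L.length ≠ 0 := by simpa using hne
      rw [pvGmi_val L hne]
      have h1 : PySem.List.slice L (some 0) (some ((L.length / 2 : Nat) : Int)) = L.take (L.length / 2) := by
        rw [PySem.List.slice_zero_start, PySem.List.slice_to_natCast]
      have h2 : PySem.List.slice L (some (((L.length / 2 : Nat) : Int) + 1)) none = L.drop (L.length / 2 + 1) := by
        have hc : (((L.length / 2 : Nat) : Int) + 1) = ((L.length / 2 + 1 : Nat) : Int) := by push_cast; ring
        rw [hc, PySem.List.slice_from_natCast]
      rw [h1, h2, PySem.List.pyGetD_natCast,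
        ih _ _ _ (by simp only [List.length_take, List.length_drop]; omega)]
      rw [pvOrd_ne L hne]
      simp
    by_cases hl : l = []
    · by_cases hr : r = []
      · subst hl; subst hr
        simp [GetMiddleIndex, pvOrd_nil]
      · have hgl : ¬ GetMiddleIndex l ≠ -1 := by simp [pvGmi_ne, hl]
        have hgr : GetMiddleIndex r ≠ -1 := (pvGmi_ne r).mpr hr
        simp only [hgl, dif_neg, not_false_iff]
        rw [step array r (by omega) hr]
        simp [hl, pvOrd_nil, hgr]
    · have hgl : GetMiddleIndex l ≠ -1 := (pvGmi_ne l).mpr hl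
      by_cases hr : r = []
      · have hgr : ¬ GetMiddleIndex r ≠ -1 := by simp [pvGmi_ne, hr]
        simp only [hgr, dif_neg, not_false_iff]
        rw [step array l (by omega) hl]
        simp [hr, pvOrd_nil, hgl]
      · have hgr : GetMiddleIndex r ≠ -1 := (pvGmi_ne r).mpr hr
        rw [dif_pos hgl, step array l (by omega) hl, dif_pos hgr,
          step (array ++ pvOrd l) r (by omega) hr]

theorem pvB_eq (array : List Int) (stack : List (List Int)) :
    pvLoopB array stack = array ++ (stack.map pvOrd).flatten := by
  fun_induction pvLoopB array stack with
  | case1 array => simp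
  | case2 a rest ih =>
    rw [ih]
    simp [pvOrd_nil]
  | case3 a chunk rest hc mid ih =>
    rw [ih]
    simp only [List.map_cons, List.flatten_cons]
    rw [pvOrd_ne chunk hc]
    simp only [List.cons_append, List.append_assoc, List.append_cancel_left_eq]
    exact rfl

-- ===== VERDICT (by name: the statement is the Claim_ definition above) =====
theorem GenArray_spec : Claim_equal_GenArray := by
  intro array l r _
  unfold Spec_GenArray GenArray_alt
  rw [pvA_eq (l.length + r.length) array l r (le_refl _), pvB_eq]
  simp
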